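-- pv_equiv track=rewrite | github.com/team-november/million-plant-map | python scrapers/FOGBIVolume4Scrape.py | first_word_not_letter
-- ===== SOURCE A (Python) =====
-- def first_word_not_letter(text):
--     flag_start_word = False
--     result = ""
--     for c in text:
--         if c.isalpha():
--             result += c
--             if not flag_start_word:
--                 flag_start_word = True
--
--         elif flag_start_word:
--             break
--
--     if len(result) > 1:
--         return True
--     else:
--         return False
-- ===== SOURCE B (Python) =====
-- def first_word_not_letter(text):
--     for i, c in enumerate(text):
--         if c.isalpha():
--             return i + 1 < len(text) and text[i + 1].isalpha()
--     return False
-- ===== Notes on version B (the rewrite author's own statement) =====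
-- stated objective: simpler
-- what changed: B never accumulates the first word: it finds the first alphabetic character and returns whether the immediately following character exists and is alphabetic, instead of A's flag-and-growing-string loop with a final length comparison.
import Mathlib
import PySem

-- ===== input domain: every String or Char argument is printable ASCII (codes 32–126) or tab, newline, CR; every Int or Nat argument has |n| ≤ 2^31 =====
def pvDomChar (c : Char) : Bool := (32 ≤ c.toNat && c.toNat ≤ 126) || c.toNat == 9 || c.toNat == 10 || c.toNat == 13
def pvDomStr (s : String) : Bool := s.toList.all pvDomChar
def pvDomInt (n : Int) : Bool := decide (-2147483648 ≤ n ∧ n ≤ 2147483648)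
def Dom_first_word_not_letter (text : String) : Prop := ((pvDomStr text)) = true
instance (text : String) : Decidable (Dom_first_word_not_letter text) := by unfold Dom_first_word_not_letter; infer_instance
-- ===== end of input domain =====

-- B changes the decomposition: no word accumulation, just the first alpha char and its successor (objective: simpler).

-- ===== PORT A =====
-- A's loop: flag + growing result string, break at first non-alpha after the word started.
def fwnlA_loop : List Char → Bool → List Char → List Char
  | [], _, result => result
  | c :: rest, flag, result =>
    if PySem.Chars.isalpha c then fwnlA_loop rest true (result ++ [c])
    else if flag then result
    else fwnlA_loop rest flag result

def first_word_not_letter (text : String) : Bool :=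
  decide ((fwnlA_loop text.toList false []).length > 1)

-- ===== PORT B =====
-- B's scan: at the first alphabetic character, answer whether the next character exists and is alphabetic.
def fwnlB_scan : List Char → Bool
  | [] => false
  | c :: rest =>
    if PySem.Chars.isalpha c then
      match rest with
      | d :: _ => PySem.Chars.isalpha d
      | [] => false
    else fwnlB_scan rest

def first_word_not_letter_alt (text : String) : Bool :=
  fwnlB_scan text.toList

-- ===== PRECONDITION & SPEC =====
def Spec_first_word_not_letter (text : String) (out : Bool) : Prop := out = first_word_not_letter_alt text
instance (text : String) (out : Bool) : Decidable (Spec_first_word_not_letter text out) := by unfold Spec_first_word_not_letter; infer_instance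

-- ===== CLAIM (what is proved, stated in full; the proofs are below) =====
def Claim_equal_first_word_not_letter : Prop := ∀ (text : String), Dom_first_word_not_letter text → Spec_first_word_not_letter text (first_word_not_letter text)

-- ===== LEMMAS AND PROOFS =====
-- With the flag set, A's loop only ever grows the accumulated word.
theorem fwnlA_loop_grows (l : List Char) : ∀ result : List Char,
    result.length ≤ (fwnlA_loop l true result).length := by
  induction l with
  | nil => intro result; simp [fwnlA_loop]
  | cons c rest ih =>
    intro result
    simp only [fwnlA_loop]
    split
    · calc result.length ≤ (result ++ [c]).length := by simp
        _ ≤ _ := ih (result ++ [c])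
    · exact le_refl _

-- Before the word starts (flag = false, empty accumulator), the loop's answer
-- is decided by the first alpha char and its successor.
theorem fwnlA_loop_main (l : List Char) :
    decide ((fwnlA_loop l false []).length > 1) = fwnlB_scan l := by
  induction l with
  | nil => simp [fwnlA_loop, fwnlB_scan]
  | cons c rest ih =>
    by_cases hc : PySem.Chars.isalpha c
    · simp only [fwnlA_loop, fwnlB_scan, hc, if_true]
      cases rest with
      | nil => simp [fwnlA_loop]
      | cons d rest' =>
        by_cases hd : PySem.Chars.isalpha d
        · simp only [fwnlA_loop, hd, if_true]
          have h := fwnlA_loop_grows rest' ([] ++ [c] ++ [d])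
          simp only [List.length_append, List.length_cons, List.length_nil] at h
          exact decide_eq_true (by omega)
        · simp [fwnlA_loop, hd]
    · simp only [fwnlA_loop, fwnlB_scan, hc]
      exact ih

-- ===== VERDICT (by name: the statement is the Claim_ definition above) =====
theorem first_word_not_letter_spec : Claim_equal_first_word_not_letter := by
  intro text _
  unfold Spec_first_word_not_letter first_word_not_letter first_word_not_letter_alt
  exact fwnlA_loop_main text.toList
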